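-- pv_equiv track=rewrite | github.com/Lingxianwen/NeuPRE | DynPRE-raw/DynPRE/FieldIdentify.py | check_zero_continuous
-- ===== SOURCE A (Python) =====
-- from typing import Dict, List, Tuple
--
-- def check_zero_continuous(l: List[int]):
--     zeros = 0
--     for i in l:
--         if i == 0:
--             zeros += 1
--     first_zero_index = -1
--     last_zero_index = -2
--     for i in range(len(l)):
--         if l[i] == 0:
--             if first_zero_index == -1:
--                 first_zero_index = i
--             last_zero_index = i
--     return zeros == last_zero_index - first_zero_index + 1
-- ===== SOURCE B (Python) =====
-- def check_zero_continuous(l):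
--     runs = 0
--     prev_zero = False
--     for x in l:
--         if x == 0 and not prev_zero:
--             runs += 1
--         prev_zero = (x == 0)
--     return runs <= 1
-- ===== Notes on version B (the rewrite author's own statement) =====
-- stated objective: idiomatic
-- what changed: B replaces A's two passes (count zeros, then scan indices for the first/last zero and compare the count with the index span) by a single pass that counts contiguous zero-runs and returns runs <= 1.
import Mathlib
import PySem

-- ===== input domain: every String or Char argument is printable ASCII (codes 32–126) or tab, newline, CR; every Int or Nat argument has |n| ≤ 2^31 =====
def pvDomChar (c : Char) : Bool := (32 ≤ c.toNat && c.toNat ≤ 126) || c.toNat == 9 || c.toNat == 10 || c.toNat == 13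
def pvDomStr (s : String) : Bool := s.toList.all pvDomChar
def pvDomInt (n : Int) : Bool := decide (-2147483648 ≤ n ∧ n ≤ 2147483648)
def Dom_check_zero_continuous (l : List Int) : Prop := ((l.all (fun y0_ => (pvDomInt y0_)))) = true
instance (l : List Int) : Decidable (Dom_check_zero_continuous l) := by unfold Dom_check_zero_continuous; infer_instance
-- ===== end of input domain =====

-- B replaces A's count-vs-index-span test by a single pass counting contiguous zero-runs (idiomatic; same O(n) cost).

-- ===== PORT A =====
def check_zero_continuous (l : List Int) : Bool :=
  let zeros : Int := l.foldl (fun z i => if i == 0 then z + 1 else z) 0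
  let st : Int × Int :=
    (PySem.List.pyRange 0 (PySem.List.len l) 1).foldl
      (fun (st : Int × Int) i =>
        if PySem.List.pyGetD l i 0 == 0 then
          ((if st.1 == -1 then i else st.1), i)
        else st)
      (-1, -2)
  zeros == st.2 - st.1 + 1

-- ===== PORT B =====
def check_zero_continuous_alt (l : List Int) : Bool :=
  let st : Int × Bool :=
    l.foldl (fun (st : Int × Bool) x =>
      (st.1 + (if x == 0 && !st.2 then 1 else 0), x == 0)) (0, false)
  decide (st.1 ≤ 1)

-- ===== PRECONDITION & SPEC =====
def Spec_check_zero_continuous (l : List Int) (out : Bool) : Prop := out = check_zero_continuous_alt l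
instance (l : List Int) (out : Bool) : Decidable (Spec_check_zero_continuous l out) := by unfold Spec_check_zero_continuous; infer_instance

-- ===== CLAIM (what is proved, stated in full; the proofs are below) =====
def Claim_equal_check_zero_continuous : Prop := ∀ (l : List Int), Dom_check_zero_continuous l → Spec_check_zero_continuous l (check_zero_continuous l)

-- ===== LEMMAS AND PROOFS =====

-- abstract quantities
def pvCnt : List Int → Int
  | [] => 0
  | x :: xs => (if x = 0 then 1 else 0) + pvCnt xs

def pvHasZero (l : List Int) : Bool := l.any (· == 0)

def pvFirstIdx : List Int → Int
  | [] => 0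
  | x :: xs => if x = 0 then 0 else pvFirstIdx xs + 1

def pvLastIdx : List Int → Int
  | [] => -2
  | x :: xs => if pvHasZero xs then pvLastIdx xs + 1 else if x = 0 then 0 else -2

def pvRuns : List Int → Bool → Int
  | [], _ => 0
  | x :: xs, p => (if x = 0 ∧ ¬p then 1 else 0) + pvRuns xs (x = 0)

theorem pvBeq (x : Int) : (x == 0) = decide (x = 0) := by
  cases h : decide (x = 0) <;> simp_all

theorem pvHasZero_mem (xs : List Int) : pvHasZero xs = true ↔ (0:Int) ∈ xs := by
  constructor
  · intro h
    simp only [pvHasZero, List.any_eq_true, beq_iff_eq] at h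
    obtain ⟨a, ha, rfl⟩ := h; exact ha
  · intro h
    simp only [pvHasZero, List.any_eq_true, beq_iff_eq]
    exact ⟨0, h, rfl⟩

-- A's first loop counts the zeros
theorem pvA_count (l : List Int) (z : Int) :
    l.foldl (fun z i => if i == 0 then z + 1 else z) z = z + pvCnt l := by
  induction l generalizing z with
  | nil => simp [pvCnt]
  | cons x xs ih => simp only [List.foldl_cons, pvCnt, ih]; split_ifs with h <;> simp_all <;> ring

-- A's second loop, once a zero has been found (first index fixed, ≥ 0)
theorem pvA_fold2 (l : List Int) (s f0 la0 : Int) (hf : 0 ≤ f0) :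
    (PySem.List.enumerate l s).foldl
      (fun (st : Int × Int) (p : Int × Int) =>
        if p.2 == 0 then ((if st.1 == -1 then p.1 else st.1), p.1) else st)
      (f0, la0)
    = (f0, if pvHasZero l then s + pvLastIdx l else la0) := by
  induction l generalizing s la0 with
  | nil => simp [PySem.List.enumerate_nil, pvHasZero]
  | cons x xs ih =>
    rw [PySem.List.enumerate_cons]
    simp only [List.foldl_cons]
    by_cases hx : x = 0
    · have hf' : (f0 == -1) = false := by simp; omega
      simp only [hx, hf', beq_self_eq_true, if_true, if_false, Bool.false_eq_true]
      rw [ih (s+1) s]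
      by_cases hz : pvHasZero xs
      · have hz' : (0:Int) ∈ xs := by simpa [pvHasZero_mem] using hz
        simp [pvHasZero_mem, pvLastIdx, hz, hz', hx, pvHasZero]
        first | omega | rfl
      · have hz' : ¬(0:Int) ∈ xs := by simpa [pvHasZero_mem] using hz
        simp [pvHasZero_mem, pvLastIdx, hz, hz', hx, pvHasZero]
        first | omega | rfl | skip
    · have hx' : ¬(0:Int) = x := fun h => hx h.symm
      have : (x == 0) = false := by simpa using hx
      simp only [this, Bool.false_eq_true, if_false]
      rw [ih (s+1) la0]
      by_cases hz : pvHasZero xs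
      · have hz' : (0:Int) ∈ xs := by simpa [pvHasZero_mem] using hz
        simp [pvHasZero_mem, pvLastIdx, hz, hz', hx, pvHasZero]
        first | omega | rfl
      · have hz' : ¬(0:Int) ∈ xs := by simpa [pvHasZero_mem] using hz
        simp [pvHasZero_mem, pvLastIdx, hz, hz', hx, pvHasZero]
        first | omega | rfl | skip

-- A's second loop from the initial state
theorem pvA_fold1 (l : List Int) (s : Int) (hs : 0 ≤ s) :
    (PySem.List.enumerate l s).foldl
      (fun (st : Int × Int) (p : Int × Int) =>
        if p.2 == 0 then ((if st.1 == -1 then p.1 else st.1), p.1) else st)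
      (-1, -2)
    = if pvHasZero l then (s + pvFirstIdx l, s + pvLastIdx l) else (-1, -2) := by
  induction l generalizing s with
  | nil => simp [PySem.List.enumerate_nil, pvHasZero]
  | cons x xs ih =>
    rw [PySem.List.enumerate_cons]
    simp only [List.foldl_cons]
    by_cases hx : x = 0
    · simp only [hx, beq_self_eq_true, if_true]
      rw [pvA_fold2 xs (s+1) s s hs]
      by_cases hz : pvHasZero xs
      · have hz' : (0:Int) ∈ xs := by simpa [pvHasZero_mem] using hz
        simp [pvHasZero_mem, pvLastIdx, pvFirstIdx, hz, hz', hx, pvHasZero]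
        first | omega | rfl | (constructor <;> omega)
      · have hz' : ¬(0:Int) ∈ xs := by simpa [pvHasZero_mem] using hz
        simp [pvHasZero_mem, pvLastIdx, pvFirstIdx, hz, hz', hx, pvHasZero]
        first | omega | rfl | skip
    · have hx' : ¬(0:Int) = x := fun h => hx h.symm
      have : (x == 0) = false := by simpa using hx
      simp only [this, Bool.false_eq_true, if_false]
      rw [ih (s+1) (by omega)]
      by_cases hz : pvHasZero xs
      · have hz' : (0:Int) ∈ xs := by simpa [pvHasZero_mem] using hz
        simp [pvHasZero_mem, pvLastIdx, pvFirstIdx, hz, hz', hx, pvHasZero]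
        first | omega | rfl | (constructor <;> omega)
      · have hz' : ¬(0:Int) ∈ xs := by simpa [pvHasZero_mem] using hz
        simp [pvHasZero_mem, pvLastIdx, pvFirstIdx, hz, hz', hx, pvHasZero]
        first | omega | rfl | skip

-- B's loop counts run starts
theorem pvB_fold (l : List Int) (r : Int) (p : Bool) :
    (l.foldl (fun (st : Int × Bool) x =>
      (st.1 + (if x == 0 && !st.2 then 1 else 0), x == 0)) (r, p)).1
    = r + pvRuns l p := by
  induction l generalizing r p with
  | nil => simp [pvRuns]
  | cons x xs ih =>
    simp only [List.foldl_cons]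
    rw [ih]
    by_cases hx : x = 0 <;> cases p <;> simp [pvRuns, pvBeq, hx] <;> ring

theorem pvRuns_nonneg (l : List Int) (p : Bool) : 0 ≤ pvRuns l p := by
  induction l generalizing p with
  | nil => simp [pvRuns]
  | cons x xs ih => simp only [pvRuns]; have := ih (x = 0); split_ifs <;> omega

theorem pvNoZero (l : List Int) (p : Bool) (h : pvHasZero l = false) :
    pvRuns l p = 0 ∧ pvCnt l = 0 := by
  induction l generalizing p with
  | nil => simp [pvRuns, pvCnt]
  | cons x xs ih =>
    simp [pvHasZero] at h
    obtain ⟨hx, hxs⟩ := h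
    have h1 := ih false (by simpa [pvHasZero] using hxs)
    have h2 := ih (decide (x = 0)) (by simpa [pvHasZero] using hxs)
    simp [pvRuns, pvCnt, hx, h1.1, h1.2, h2.1, h2.2]

theorem pvRuns_pos (l : List Int) (h : pvHasZero l = true) :
    1 ≤ pvRuns l false := by
  induction l with
  | nil => simp [pvHasZero] at h
  | cons x xs ih =>
    by_cases hx : x = 0
    · have hnn := pvRuns_nonneg xs true
      subst hx
      simp only [pvRuns]; simp; omega
    · have hxs : pvHasZero xs = true := by simpa [pvHasZero, hx] using h
      have := ih hxs
      simp only [pvRuns, hx]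
      have hd : decide (x = 0) = false := by simpa using hx
      simp [hd, hx]; omega

theorem pvCnt_le (l : List Int) (h : pvHasZero l = true) : pvCnt l ≤ pvLastIdx l + 1 := by
  induction l with
  | nil => simp [pvHasZero] at h
  | cons x xs ih =>
    by_cases hz : pvHasZero xs
    · have := ih hz
      simp only [pvCnt, pvLastIdx, hz, if_true]
      split_ifs <;> omega
    · have hx : x = 0 := by
        simp [pvHasZero] at h hz
        rcases h with h | h
        · exact h
        · exact absurd h (by simpa using hz)
      have := (pvNoZero xs true (by simpa using hz)).2
      simp [pvCnt, pvLastIdx, hz, hx, this]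

-- contiguity from inside a zero-run: zeros fill positions 0..lastIdx  ↔  no new run starts
theorem pvAux (l : List Int) (h : pvHasZero l = true) :
    pvCnt l = pvLastIdx l + 1 ↔ pvRuns l true = 0 := by
  induction l with
  | nil => simp [pvHasZero] at h
  | cons x xs ih =>
    by_cases hx : x = 0
    · simp only [pvCnt, pvLastIdx, pvRuns, hx, if_true, not_true, and_false, if_false, true_and,
        zero_add]
      by_cases hz : pvHasZero xs
      · rw [if_pos hz]
        have := ih hz
        constructor <;> intro hh
        · exact this.mp (by omega)
        · have := this.mpr hh; omega
      · rw [if_neg (by simp [hz])]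
        have := pvNoZero xs true (by simpa using hz)
        simp [this.1, this.2]
    · have hz : pvHasZero xs = true := by simpa [pvHasZero, hx] using h
      have hle := pvCnt_le xs hz
      have hpos := pvRuns_pos xs hz
      have hd : decide (x = 0) = false := by simpa using hx
      simp only [pvCnt, pvLastIdx, pvRuns, hx, hz, if_true, if_false, hd]
      constructor <;> intro hh
      · exfalso; simp [hx] at hh; omega
      · simp [hx] at hh; omega

-- main: count = span  ↔  exactly one run
theorem pvMain (l : List Int) (h : pvHasZero l = true) :
    pvCnt l = pvLastIdx l - pvFirstIdx l + 1 ↔ pvRuns l false = 1 := by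
  induction l with
  | nil => simp [pvHasZero] at h
  | cons x xs ih =>
    by_cases hx : x = 0
    · have hr : pvRuns (x :: xs) false = 1 + pvRuns xs true := by simp [pvRuns, hx]
      have hnn := pvRuns_nonneg xs true
      rw [hr]
      by_cases hz : pvHasZero xs
      · have := pvAux xs hz
        simp only [pvCnt, pvLastIdx, pvFirstIdx, hx, if_true, hz]
        constructor <;> intro hh
        · have := this.mp (by omega); omega
        · have := this.mpr (by omega); omega
      · have := pvNoZero xs true (by simpa using hz)
        simp [pvCnt, pvLastIdx, pvFirstIdx, hx, hz, this.1, this.2]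
    · have hz : pvHasZero xs = true := by simpa [pvHasZero, hx] using h
      have := ih hz
      have hd : decide (x = 0) = false := by simpa using hx
      have hr : pvRuns (x :: xs) false = pvRuns xs false := by simp [pvRuns, hx, hd]
      rw [hr]
      simp only [pvCnt, pvLastIdx, pvFirstIdx, hx, hz, if_true, if_false]
      constructor <;> intro hh
      · exact this.mp (by omega)
      · have := this.mpr hh; omega

-- bridge: A's index loop over range(len(l)) is the fold over enumerate l 0
theorem pvA_enum (l : List Int) :
    (PySem.List.pyRange 0 (PySem.List.len l) 1).foldl
      (fun (st : Int × Int) i =>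
        if PySem.List.pyGetD l i 0 == 0 then ((if st.1 == -1 then i else st.1), i) else st)
      (-1, -2)
    = (PySem.List.enumerate l 0).foldl
      (fun (st : Int × Int) (p : Int × Int) =>
        if p.2 == 0 then ((if st.1 == -1 then p.1 else st.1), p.1) else st)
      (-1, -2) := by
  rw [PySem.List.enumerate_eq_map_pyRange (d := 0), List.foldl_map]

-- ===== VERDICT (by name: the statement is the Claim_ definition above) =====
theorem check_zero_continuous_spec : Claim_equal_check_zero_continuous := by
  intro l _
  unfold Spec_check_zero_continuous check_zero_continuous check_zero_continuous_alt
  simp only []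
  rw [pvA_count l 0, pvA_enum, pvA_fold1 l 0 le_rfl]
  rw [show (l.foldl (fun (st : Int × Bool) x =>
      (st.1 + (if x == 0 && !st.2 then 1 else 0), x == 0)) ((0:Int), false)).1
    = 0 + pvRuns l false from pvB_fold l 0 false]
  by_cases hz : pvHasZero l
  · have hmain := pvMain l hz
    have hpos := pvRuns_pos l hz
    simp only [hz, if_true, zero_add]
    rw [Bool.eq_iff_iff]
    simp only [beq_iff_eq, decide_eq_true_eq]
    constructor
    · intro h; have := hmain.mp (by omega); omega
    · intro h; have := hmain.mpr (by omega); omega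
  · have := pvNoZero l false (by simpa using hz)
    simp [hz, this.1, this.2]
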